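-- pv_equiv track=rewrite | github.com/Daafb/ML-EMT | functions.py | _parse_optool_warnings
-- ===== SOURCE A (Python) =====
-- def _parse_optool_warnings(stdout: str, stderr: str) -> list[str]:
--     text = (stdout or "") + "\n" + (stderr or "")
--     lines = text.splitlines()
--
--     warnings = []
--     current_block = []
--
--     for line in lines:
--         stripped = line.strip()
--
--         # new warning starts
--         if stripped.startswith("WARNING:"):
--             # store previous block if any
--             if current_block:
--                 warnings.append(" ".join(current_block))
--                 current_block = []
--
--             current_block.append(stripped)
--
--         # continuation line (indented or not empty but not a new header)
--         elif current_block and stripped != "":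
--             current_block.append(stripped)
--
--         # blank line ends block
--         elif current_block:
--             warnings.append(" ".join(current_block))
--             current_block = []
--
--     # catch last block
--     if current_block:
--         warnings.append(" ".join(current_block))
--
--     return warnings
-- ===== SOURCE B (Python) =====
-- def _parse_optool_warnings(stdout: str, stderr: str) -> list[str]:
--     text = (stdout or "") + "\n" + (stderr or "")
--     lines = [ln.strip() for ln in text.splitlines()]
--     warnings = []
--     for para in _paragraphs(lines):
--         warnings.extend(_blocks(para))
--     return warnings
--
--
-- def _paragraphs(lines):
--     """Maximal runs of non-blank (stripped) lines, blank lines as separators."""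
--     paras, cur = [], []
--     for s in lines:
--         if s != "":
--             cur.append(s)
--         elif cur:
--             paras.append(cur)
--             cur = []
--     if cur:
--         paras.append(cur)
--     return paras
--
--
-- def _blocks(para):
--     # lines before the first "WARNING:" header belong to no block
--     i = 0
--     while i < len(para) and not para[i].startswith("WARNING:"):
--         i += 1
--     return _blocks_from(para[i:])
--
--
-- def _blocks_from(para):
--     # para is empty or starts with a header: slice off one block per header
--     if not para:
--         return []
--     j = 1
--     while j < len(para) and not para[j].startswith("WARNING:"):
--         j += 1
--     return [" ".join(para[:j])] + _blocks_from(para[j:])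
-- ===== Notes on version B (the rewrite author's own statement) =====
-- stated objective: alternative
-- what changed: A's single flat state machine (flush current block on blank line or new header) is replaced by a two-phase decomposition: split the stripped lines into blank-separated paragraphs, then slice each paragraph at its 'WARNING:' headers, dropping pre-header lines.
import Mathlib
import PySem

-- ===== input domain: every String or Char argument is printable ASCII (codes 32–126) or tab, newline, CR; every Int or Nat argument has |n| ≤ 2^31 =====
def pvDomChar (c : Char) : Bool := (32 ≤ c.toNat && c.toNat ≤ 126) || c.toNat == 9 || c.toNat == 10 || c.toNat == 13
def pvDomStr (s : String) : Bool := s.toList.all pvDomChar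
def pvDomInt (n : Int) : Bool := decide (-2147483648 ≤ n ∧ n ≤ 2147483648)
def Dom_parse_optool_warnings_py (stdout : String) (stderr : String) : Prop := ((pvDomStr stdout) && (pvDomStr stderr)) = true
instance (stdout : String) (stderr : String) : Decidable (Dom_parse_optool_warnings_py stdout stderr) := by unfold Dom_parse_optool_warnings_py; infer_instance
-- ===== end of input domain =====

-- B replaces A's flat flush-on-blank state machine by a two-phase decomposition
-- (split into blank-separated paragraphs, then slice each paragraph at its
-- "WARNING:" headers); objective: alternative decomposition, same cost.

-- ===== PORT A =====
-- one step of A's loop body, applied to the already-stripped line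
def pvStepA (st : List String × List String) (stripped : String) : List String × List String :=
  if PySem.Str.startswith stripped "WARNING:" then
    -- store previous block if any, then current_block.append(stripped)
    let st := if st.2 ≠ [] then (st.1 ++ [PySem.Str.join " " st.2], ([] : List String)) else st
    (st.1, st.2 ++ [stripped])
  else if st.2 ≠ [] ∧ stripped ≠ "" then
    -- continuation line
    (st.1, st.2 ++ [stripped])
  else if st.2 ≠ [] then
    -- blank line ends block
    (st.1 ++ [PySem.Str.join " " st.2], [])
  else st

def parse_optool_warnings_py (stdout : String) (stderr : String) : List String :=
  let text := (if stdout = "" then "" else stdout) ++ "\n" ++ (if stderr = "" then "" else stderr)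
  let lines := PySem.Str.splitlines text
  let st := lines.foldl (fun st line => pvStepA st (PySem.Str.strip line)) ([], [])
  -- catch last block
  if st.2 ≠ [] then st.1 ++ [PySem.Str.join " " st.2] else st.1

-- ===== PORT B =====
def pvNotHead (s : String) : Bool := !(PySem.Str.startswith s "WARNING:")

-- _blocks_from: para is empty or starts with a header; slice off one block per header
def pvBlocksFrom : List String → List String
  | [] => []
  | s :: rest =>
      PySem.Str.join " " (s :: rest.takeWhile pvNotHead) :: pvBlocksFrom (rest.dropWhile pvNotHead)
termination_by l => l.length
decreasing_by exact Nat.lt_succ_of_le (List.length_dropWhile_le _ _)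

-- _blocks: drop the pre-header lines of the paragraph, then slice
def pvBlocks (para : List String) : List String :=
  pvBlocksFrom (para.dropWhile pvNotHead)

-- _paragraphs: maximal runs of non-blank stripped lines
def pvParasGo : List String → List String → List (List String)
  | [], cur => if cur ≠ [] then [cur] else []
  | s :: rest, cur =>
      if s ≠ "" then pvParasGo rest (cur ++ [s])
      else if cur ≠ [] then cur :: pvParasGo rest [] else pvParasGo rest []

def parse_optool_warnings_py_alt (stdout : String) (stderr : String) : List String :=
  let text := (if stdout = "" then "" else stdout) ++ "\n" ++ (if stderr = "" then "" else stderr)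
  let lines := (PySem.Str.splitlines text).map PySem.Str.strip
  (pvParasGo lines []).flatMap pvBlocks

-- ===== PRECONDITION & SPEC =====
def Spec_parse_optool_warnings_py (stdout : String) (stderr : String) (out : List String) : Prop := out = parse_optool_warnings_py_alt stdout stderr
instance (stdout : String) (stderr : String) (out : List String) : Decidable (Spec_parse_optool_warnings_py stdout stderr out) := by unfold Spec_parse_optool_warnings_py; infer_instance

-- ===== CLAIM (what is proved, stated in full; the proofs are below) =====
def Claim_equal_parse_optool_warnings_py : Prop := ∀ (stdout : String) (stderr : String), Dom_parse_optool_warnings_py stdout stderr → Spec_parse_optool_warnings_py stdout stderr (parse_optool_warnings_py stdout stderr)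

-- ===== LEMMAS AND PROOFS =====

-- continuation predicate of the reference machine: non-blank and not a header
def pvContP (s : String) : Bool := (!(s == "")) && pvNotHead s

-- common specification both ports are reduced to
def pvSpecW : List String → List String
  | [] => []
  | s :: rest =>
      if PySem.Str.startswith s "WARNING:" then
        PySem.Str.join " " (s :: rest.takeWhile pvContP) :: pvSpecW (rest.dropWhile pvContP)
      else pvSpecW rest
termination_by l => l.length
decreasing_by
  all_goals first
    | exact Nat.lt_succ_of_le (List.length_dropWhile_le _ _)
    | exact Nat.lt_succ_self _

def pvFinish (st : List String × List String) : List String :=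
  if st.2 ≠ [] then st.1 ++ [PySem.Str.join " " st.2] else st.1

theorem pvSpecW_nil : pvSpecW [] = [] := by unfold pvSpecW; rfl

theorem pvSpecW_cons (s : String) (rest : List String) :
    pvSpecW (s :: rest) =
      if PySem.Str.startswith s "WARNING:" then
        PySem.Str.join " " (s :: rest.takeWhile pvContP) :: pvSpecW (rest.dropWhile pvContP)
      else pvSpecW rest := by
  rw [pvSpecW.eq_2]

theorem pvBlocksFrom_nil : pvBlocksFrom [] = [] := by unfold pvBlocksFrom; rfl

theorem pvBlocksFrom_cons (s : String) (rest : List String) :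
    pvBlocksFrom (s :: rest) =
      PySem.Str.join " " (s :: rest.takeWhile pvNotHead) :: pvBlocksFrom (rest.dropWhile pvNotHead) := by
  rw [pvBlocksFrom.eq_2]

theorem pvStart_empty : PySem.Str.startswith "" "WARNING:" = false := by decide

theorem pvContP_empty : pvContP "" = false := by decide

theorem pvContP_head {s : String} (h : PySem.Str.startswith s "WARNING:" = true) :
    pvContP s = false := by
  unfold pvContP pvNotHead
  rw [h]
  simp

theorem pvContP_cont {s : String} (h : PySem.Str.startswith s "WARNING:" = false)
    (hs : s ≠ "") : pvContP s = true := by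
  unfold pvContP pvNotHead
  rw [h]
  simp [hs]

theorem pvSpecW_blank (rest : List String) : pvSpecW ("" :: rest) = pvSpecW rest := by
  rw [pvSpecW_cons, if_neg (by rw [pvStart_empty]; simp)]

-- step lemmas: the four branches of A's loop body
theorem pvStepA_head (ws cur : List String) (s : String)
    (h : PySem.Str.startswith s "WARNING:" = true) :
    pvStepA (ws, cur) s = ((if cur = [] then ws else ws ++ [PySem.Str.join " " cur]), [s]) := by
  unfold pvStepA
  rw [if_pos h]
  by_cases hc : cur = [] <;> simp [hc]

theorem pvStepA_cont (ws cur : List String) (s : String)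
    (h : PySem.Str.startswith s "WARNING:" = false) (hc : cur ≠ []) (hs : s ≠ "") :
    pvStepA (ws, cur) s = (ws, cur ++ [s]) := by
  unfold pvStepA
  rw [if_neg (by rw [h]; simp)]
  simp [hc, hs]

theorem pvStepA_blank (ws cur : List String) (s : String)
    (h : PySem.Str.startswith s "WARNING:" = false) (hc : cur ≠ []) (hs : s = "") :
    pvStepA (ws, cur) s = (ws ++ [PySem.Str.join " " cur], []) := by
  subst hs
  unfold pvStepA
  rw [if_neg (by rw [h]; simp)]
  simp [hc]

theorem pvStepA_idle (ws cur : List String) (s : String)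
    (h : PySem.Str.startswith s "WARNING:" = false) (hc : cur = []) :
    pvStepA (ws, cur) s = (ws, cur) := by
  subst hc
  unfold pvStepA
  rw [if_neg (by rw [h]; simp)]
  simp

-- A's fold, from an arbitrary state, computes pvSpecW
theorem pvA_fold (l : List String) : ∀ (ws cur : List String),
    pvFinish (l.foldl pvStepA (ws, cur)) =
      (if cur = [] then ws ++ pvSpecW l
       else ws ++ PySem.Str.join " " (cur ++ l.takeWhile pvContP) :: pvSpecW (l.dropWhile pvContP)) := by
  induction l with
  | nil =>
      intro ws cur
      by_cases h : cur = [] <;> simp [pvFinish, h, pvSpecW_nil]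
  | cons s rest ih =>
      intro ws cur
      rw [List.foldl_cons]
      by_cases hh : PySem.Str.startswith s "WARNING:" = true
      · -- header line
        rw [pvStepA_head ws cur s hh, ih, if_neg (by simp)]
        rw [List.takeWhile_cons, List.dropWhile_cons, pvContP_head hh]
        simp only [Bool.false_eq_true, if_false]
        by_cases hc : cur = []
        · rw [if_pos hc, if_pos hc, pvSpecW_cons, if_pos hh]
          simp
        · rw [if_neg hc, if_neg hc, pvSpecW_cons, if_pos hh]
          simp [List.append_assoc]
      · have hh' : PySem.Str.startswith s "WARNING:" = false := by
          cases h : PySem.Str.startswith s "WARNING:" <;> simp_all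
        by_cases hc : cur = []
        · -- no active block: line is ignored
          rw [pvStepA_idle ws cur s hh' hc, ih, if_pos hc, if_pos hc]
          by_cases hs : s = ""
          · subst hs; rw [pvSpecW_blank]
          · rw [pvSpecW_cons, if_neg (by rw [hh']; simp)]
        · by_cases hs : s = ""
          · -- blank line flushes the block
            rw [pvStepA_blank ws cur s hh' hc hs, ih, if_pos rfl, if_neg hc]
            subst hs
            rw [List.takeWhile_cons, List.dropWhile_cons, pvContP_empty]
            simp [pvSpecW_blank]
          · -- continuation line
            rw [pvStepA_cont ws cur s hh' hc hs, ih, if_neg (by simp [hc]), if_neg hc]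
            rw [List.takeWhile_cons, List.dropWhile_cons, pvContP_cont hh' hs]
            simp [List.append_assoc]

theorem pvTakeWhile_congr {α : Type} (p q : α → Bool) (l : List α)
    (h : ∀ x ∈ l, p x = q x) : l.takeWhile p = l.takeWhile q := by
  induction l with
  | nil => rfl
  | cons a l ih =>
      rw [List.takeWhile_cons, List.takeWhile_cons, h a (by simp)]
      by_cases hq : q a = true <;> simp [hq, ih fun x hx => h x (by simp [hx])]

theorem pvDropWhile_congr {α : Type} (p q : α → Bool) (l : List α)
    (h : ∀ x ∈ l, p x = q x) : l.dropWhile p = l.dropWhile q := by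
  induction l with
  | nil => rfl
  | cons a l ih =>
      rw [List.dropWhile_cons, List.dropWhile_cons, h a (by simp)]
      by_cases hq : q a = true <;> simp [hq, ih fun x hx => h x (by simp [hx])]

-- on blank-free paragraphs the spec is exactly B's header slicing
theorem pvB1 : ∀ (n : ℕ) (para : List String), para.length ≤ n →
    (∀ s ∈ para, s ≠ "") → pvSpecW para = pvBlocks para := by
  intro n
  induction n with
  | zero =>
      intro para hlen _
      have : para = [] := List.eq_nil_of_length_eq_zero (Nat.le_zero.mp hlen)
      subst this
      rw [pvSpecW_nil]
      unfold pvBlocks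
      rw [List.dropWhile_nil, pvBlocksFrom_nil]
  | succ n ih =>
      intro para hlen hnb
      match para with
      | [] =>
        rw [pvSpecW_nil]
        unfold pvBlocks
        rw [List.dropWhile_nil, pvBlocksFrom_nil]
      | s :: rest =>
        have hnbr : ∀ x ∈ rest, x ≠ "" := fun x hx => hnb x (by simp [hx])
        have hcong : ∀ x ∈ rest, pvContP x = pvNotHead x := by
          intro x hx
          unfold pvContP
          simp [hnbr x hx]
        by_cases hh : PySem.Str.startswith s "WARNING:" = true
        · rw [pvSpecW_cons, if_pos hh]
          unfold pvBlocks
          rw [List.dropWhile_cons, if_neg (by unfold pvNotHead; rw [hh]; simp)]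
          rw [pvBlocksFrom_cons]
          rw [pvTakeWhile_congr _ _ _ hcong]
          congr 1
          rw [pvDropWhile_congr _ _ _ hcong]
          have hsub := (List.dropWhile_sublist (l := rest) (p := pvNotHead)).subset
          have hlen' : (rest.dropWhile pvNotHead).length ≤ n := by
            have := List.length_dropWhile_le pvNotHead rest
            simp only [List.length_cons] at hlen
            omega
          rw [ih _ hlen' (fun x hx => hnbr x (hsub hx))]
          unfold pvBlocks
          rw [List.dropWhile_idempotent]
        · have hh2 : PySem.Str.startswith s "WARNING:" = false := by
            cases h : PySem.Str.startswith s "WARNING:" <;> simp_all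
          rw [pvSpecW_cons, if_neg hh]
          unfold pvBlocks
          rw [List.dropWhile_cons, if_pos (by unfold pvNotHead; rw [hh2]; rfl)]
          have hlen' : rest.length ≤ n := by
            simp only [List.length_cons] at hlen; omega
          rw [ih rest hlen' hnbr]
          rfl

-- the spec splits at a blank line following a blank-free prefix
theorem pvB3 : ∀ (n : ℕ) (cur rest : List String), cur.length ≤ n →
    (∀ s ∈ cur, s ≠ "") →
    pvSpecW (cur ++ "" :: rest) = pvSpecW cur ++ pvSpecW rest := by
  intro n
  induction n with
  | zero =>
      intro cur rest hlen _
      have : cur = [] := List.eq_nil_of_length_eq_zero (Nat.le_zero.mp hlen)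
      subst this
      rw [List.nil_append, pvSpecW_blank, pvSpecW_nil, List.nil_append]
  | succ n ih =>
      intro cur rest hlen hnb
      match cur with
      | [] => rw [List.nil_append, pvSpecW_blank, pvSpecW_nil, List.nil_append]
      | s :: cur' =>
        have hnb' : ∀ x ∈ cur', x ≠ "" := fun x hx => hnb x (by simp [hx])
        by_cases hh : PySem.Str.startswith s "WARNING:" = true
        · rw [List.cons_append, pvSpecW_cons, if_pos hh, pvSpecW_cons, if_pos hh]
          rw [List.takeWhile_append, List.dropWhile_append]
          have hsum := congrArg List.length (cur'.takeWhile_append_dropWhile (p := pvContP))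
          simp only [List.length_append] at hsum
          by_cases hall : (cur'.takeWhile pvContP).length = cur'.length
          · have hdrop : cur'.dropWhile pvContP = [] := by
              have : (cur'.dropWhile pvContP).length = 0 := by omega
              exact List.eq_nil_of_length_eq_zero this
            have htake : cur'.takeWhile pvContP = cur' :=
              (List.takeWhile_prefix _).eq_of_length hall
            rw [if_pos hall, hdrop]
            simp [htake, pvSpecW_blank, pvSpecW_nil, pvContP_empty]
          · have hdrop : ¬ (cur'.dropWhile pvContP).isEmpty = true := by
              simp only [List.isEmpty_iff]
              intro h
              rw [h] at hsum
              simp at hsum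
              omega
            rw [if_neg hall, if_neg hdrop]
            have hlen' : (cur'.dropWhile pvContP).length ≤ n := by
              have h1 := List.length_dropWhile_le pvContP cur'
              simp only [List.length_cons] at hlen
              omega
            have hsub := (List.dropWhile_sublist (l := cur') (p := pvContP)).subset
            rw [ih _ rest hlen' (fun x hx => hnb' x (hsub hx))]
            rw [List.cons_append]
        · rw [List.cons_append, pvSpecW_cons, if_neg hh, pvSpecW_cons, if_neg hh]
          exact ih cur' rest (by simp only [List.length_cons] at hlen; omega) hnb'

-- B's paragraph pass computes pvSpecW
theorem pvB_main : ∀ (l cur : List String), (∀ s ∈ cur, s ≠ "") →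
    (pvParasGo l cur).flatMap pvBlocks = pvSpecW (cur ++ l) := by
  intro l
  induction l with
  | nil =>
      intro cur hnb
      rw [List.append_nil]
      by_cases hc : cur = []
      · subst hc
        rw [pvSpecW_nil]; rfl
      · simp only [pvParasGo, if_pos hc]
        rw [List.flatMap_cons, List.flatMap_nil, List.append_nil]
        exact (pvB1 cur.length cur le_rfl hnb).symm
  | cons s rest ih =>
      intro cur hnb
      by_cases hs : s = ""
      · subst hs
        simp only [pvParasGo, ne_eq, not_true_eq_false, if_false]
        by_cases hc : cur = []
        · subst hc
          rw [if_neg (by simp), ih [] (by simp), List.nil_append, List.nil_append, pvSpecW_blank]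
        · rw [if_pos hc, List.flatMap_cons, ih [] (by simp), List.nil_append]
          rw [pvB3 cur.length cur rest le_rfl hnb]
          rw [pvB1 cur.length cur le_rfl hnb]
      · simp only [pvParasGo, if_pos hs]
        rw [ih (cur ++ [s]) (by
              intro x hx
              rcases List.mem_append.mp hx with h | h
              · exact hnb x h
              · simp at h; subst h; exact hs)]
        simp [List.append_assoc]

-- ===== VERDICT (by name: the statement is the Claim_ definition above) =====
theorem parse_optool_warnings_py_spec : Claim_equal_parse_optool_warnings_py := by
  intro stdout stderr _
  unfold Spec_parse_optool_warnings_py parse_optool_warnings_py parse_optool_warnings_py_alt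
  show pvFinish _ = _
  rw [← List.foldl_map (f := PySem.Str.strip) (g := pvStepA)]
  rw [pvA_fold _ [] [], if_pos rfl, List.nil_append]
  rw [pvB_main _ [] (by simp), List.nil_append]
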